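-- pv_equiv track=rewrite | github.com/Benjtkim/CS111_Work | Problem Set 2/ps2pr2.py | repeat_elem
-- ===== SOURCE A (Python) =====
-- def repeat_elem(values, index, num_times):
--     """This function takes a list (values), an integer (index), and a positive integer (num_times), and returns a
--     new list in which the element of values at position index has been repeated num_times times."""
--     new_list = []
--     for x in range(len(values)):
--         if x != index:
--             new_list.append(values[x])
--         else:
--             for x in range(num_times):
--                 new_list.append(values[index])
--     return new_list
-- ===== SOURCE B (Python) =====
-- def repeat_elem(values, index, num_times):
--     """Same task via whole-slice construction instead of a per-element loop."""
--     if 0 <= index < len(values):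
--         return values[:index] + [values[index]] * num_times + values[index + 1:]
--     return list(values)
-- ===== Notes on version B (the rewrite author's own statement) =====
-- stated objective: idiomatic
-- what changed: Replaces A's index loop with per-element branch (and inner repetition loop) by a bounds guard plus whole-slice concatenation values[:index] + [values[index]]*num_times + values[index+1:], copying the list when index is out of range.
import Mathlib
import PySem

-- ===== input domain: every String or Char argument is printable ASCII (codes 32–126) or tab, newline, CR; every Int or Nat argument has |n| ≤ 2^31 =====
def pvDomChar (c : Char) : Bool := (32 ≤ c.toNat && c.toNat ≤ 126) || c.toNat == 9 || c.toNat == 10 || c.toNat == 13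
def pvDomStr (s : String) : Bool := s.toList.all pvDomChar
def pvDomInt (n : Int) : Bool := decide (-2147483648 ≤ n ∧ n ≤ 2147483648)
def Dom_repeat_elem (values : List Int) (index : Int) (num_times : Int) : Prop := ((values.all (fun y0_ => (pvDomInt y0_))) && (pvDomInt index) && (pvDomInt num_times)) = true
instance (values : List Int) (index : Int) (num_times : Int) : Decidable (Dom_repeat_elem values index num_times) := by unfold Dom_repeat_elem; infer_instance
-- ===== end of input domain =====

-- B replaces A's per-element loop-and-branch by a bounds guard plus whole-slice concatenation (idiomatic; same cost).


-- ===== PORT A =====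
-- literal port: for x in range(len(values)): if x != index append values[x] else inner loop appends values[index] num_times times
def repeat_elem (values : List Int) (index : Int) (num_times : Int) : List Int :=
  (PySem.List.pyRange 0 (values.length : Int) 1).foldl
    (fun new_list x =>
      if x ≠ index then new_list ++ [PySem.List.pyGetD values x 0]
      else (PySem.List.pyRange 0 num_times 1).foldl
        (fun nl _ => nl ++ [PySem.List.pyGetD values index 0]) new_list)
    []

-- ===== PORT B =====
-- [v]*num_times is List.replicate num_times.toNat v (exact: Python yields [] for num_times ≤ 0);
-- the slices are PySem.List.slice; list(values) is values.
def repeat_elem_alt (values : List Int) (index : Int) (num_times : Int) : List Int :=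
  if 0 ≤ index ∧ index < (values.length : Int) then
    PySem.List.slice values none (some index)
      ++ List.replicate num_times.toNat (PySem.List.pyGetD values index 0)
      ++ PySem.List.slice values (some (index + 1)) none
  else values

-- ===== PRECONDITION & SPEC =====
def Spec_repeat_elem (values : List Int) (index : Int) (num_times : Int) (out : List Int) : Prop := out = repeat_elem_alt values index num_times
instance (values : List Int) (index : Int) (num_times : Int) (out : List Int) : Decidable (Spec_repeat_elem values index num_times out) := by unfold Spec_repeat_elem; infer_instance

-- ===== CLAIM (what is proved, stated in full; the proofs are below) =====
def Claim_equal_repeat_elem : Prop := ∀ (values : List Int) (index : Int) (num_times : Int), Dom_repeat_elem values index num_times → Spec_repeat_elem values index num_times (repeat_elem values index num_times)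

-- ===== LEMMAS AND PROOFS =====

-- the prefix segment of A's loop reads values.take index.toNat
theorem pv_map_pyGetD_take (values : List Int) (index : Int)
    (h0 : 0 ≤ index) (h1 : index ≤ (values.length : Int)) :
    (PySem.List.pyRange 0 index 1).map (fun j => PySem.List.pyGetD values j 0)
      = values.take index.toNat := by
  apply List.ext_getElem
  · simp [PySem.List.length_pyRange_one]
    omega
  · intro k hk1 hk2
    simp [PySem.List.length_pyRange_one] at hk1
    rw [List.getElem_map, PySem.List.getElem_pyRange_one, List.getElem_take]
    rw [PySem.List.pyGetD_eq_getElem values 0 (by omega) (by omega)]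
    congr 1
    omega

-- A's inner repetition loop appends num_times copies
theorem pv_inner_loop (v : Int) (num_times : Int) (acc : List Int) :
    (PySem.List.pyRange 0 num_times 1).foldl (fun nl _ => nl ++ [v]) acc
      = acc ++ List.replicate num_times.toNat v := by
  rw [PySem.List.foldl_append_singleton_eq_map (fun _ : Int => v)
        (PySem.List.pyRange 0 num_times 1) acc,
      List.map_const', PySem.List.length_pyRange_one]
  simp

-- ===== VERDICT (by name: the statement is the Claim_ definition above) =====
theorem repeat_elem_spec : Claim_equal_repeat_elem := by
  intro values index num_times _
  unfold Spec_repeat_elem repeat_elem repeat_elem_alt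
  by_cases h : 0 ≤ index ∧ index < (values.length : Int)
  · rw [if_pos h]
    obtain ⟨h0, h1⟩ := h
    rw [PySem.List.pyRange_one_append 0 index (values.length : Int) h0 (le_of_lt h1),
        PySem.List.pyRange_one_append index (index + 1) (values.length : Int) (by omega) (by omega),
        PySem.List.pyRange_one_singleton, List.foldl_append, List.foldl_append]
    -- prefix segment: every x < index, so the first branch fires
    rw [PySem.List.foldl_congr_mem _ _
        (fun nl x => nl ++ [PySem.List.pyGetD values x 0]) []
        (by intro acc x hx
            rw [PySem.List.mem_pyRange_one] at hx
            simp [show x ≠ index by omega]),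
        PySem.List.foldl_append_singleton_eq_map, List.nil_append,
        pv_map_pyGetD_take values index h0 (le_of_lt h1)]
    -- middle: the else branch
    rw [List.foldl_cons, List.foldl_nil, if_neg (by simp), pv_inner_loop]
    -- suffix segment: every x > index
    rw [PySem.List.foldl_congr_mem _ _
        (fun nl x => nl ++ [PySem.List.pyGetD values x 0]) _
        (by intro acc x hx
            rw [PySem.List.mem_pyRange_one] at hx
            simp [show x ≠ index by omega]),
        PySem.List.foldl_append_singleton_eq_map]
    rw [show (values.length : Int) = PySem.List.len values by simp [PySem.List.len],
        PySem.List.map_pyGetD_pyRange values 0 (by omega : (0:Int) ≤ index + 1)]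
    rw [PySem.List.slice_to values h0, PySem.List.slice_from values (by omega : (0:Int) ≤ index + 1)]
  · rw [if_neg h]
    -- out of range: the first branch always fires, the loop copies values
    rw [PySem.List.foldl_congr_mem _ _
        (fun nl x => nl ++ [PySem.List.pyGetD values x 0]) []
        (by intro acc x hx
            rw [PySem.List.mem_pyRange_one] at hx
            simp [show x ≠ index by omega]),
        PySem.List.foldl_append_singleton_eq_map, List.nil_append]
    rw [show (values.length : Int) = PySem.List.len values by simp [PySem.List.len],
        PySem.List.map_pyGetD_pyRange values 0 (le_refl (0:Int))]
    simp
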